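-- pv_equiv track=rewrite | github.com/EvanJohnstone48/threestarRL | app/sandbox_core/grid.py | footprint_tiles
-- ===== SOURCE A (Python) =====
-- from collections.abc import Iterator
--
-- def footprint_tiles(
--     origin: tuple[int, int], footprint: tuple[int, int]
-- ) -> Iterator[tuple[int, int]]:
--     r0, c0 = origin
--     h, w = footprint
--     for dr in range(h):
--         for dc in range(w):
--             yield (r0 + dr, c0 + dc)
-- ===== SOURCE B (Python) =====
-- def footprint_tiles(origin, footprint):
--     r0, c0 = origin
--     h, w = footprint
--     if h <= 0 or w <= 0:
--         return
--     if h == 1: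
--         for dc in range(w):
--             yield (r0, c0 + dc)
--     else:
--         top = h // 2
--         yield from footprint_tiles((r0, c0), (top, w))
--         yield from footprint_tiles((r0 + top, c0), (h - top, w))
-- ===== Notes on version B (the rewrite author's own statement) =====
-- stated objective: alternative
-- what changed: Replaces the nested double loop with divide-and-conquer on the footprint height: split the rectangle into top and bottom halves, recurse on each, and emit a single row at height 1; same tiles in the same row-major order with recursion depth O(log h).
import Mathlib
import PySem

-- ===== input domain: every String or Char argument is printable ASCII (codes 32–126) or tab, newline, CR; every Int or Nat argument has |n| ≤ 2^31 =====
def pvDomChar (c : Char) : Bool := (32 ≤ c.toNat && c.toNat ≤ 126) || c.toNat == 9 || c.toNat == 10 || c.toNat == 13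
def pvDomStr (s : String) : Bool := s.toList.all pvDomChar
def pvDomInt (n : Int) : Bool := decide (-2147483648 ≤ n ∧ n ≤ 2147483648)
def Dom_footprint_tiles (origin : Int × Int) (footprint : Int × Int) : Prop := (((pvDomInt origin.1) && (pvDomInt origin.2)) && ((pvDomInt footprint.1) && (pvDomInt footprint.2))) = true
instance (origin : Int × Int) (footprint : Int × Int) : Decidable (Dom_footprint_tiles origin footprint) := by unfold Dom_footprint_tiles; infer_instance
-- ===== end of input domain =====

-- B replaces A's nested loops by divide-and-conquer on the footprint height (objective: alternative decomposition). A is a generator; both ports return the yielded sequence as a list.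

-- ===== PORT A =====
-- nested 'for dr in range(h): for dc in range(w): yield (r0+dr, c0+dc)'
def footprint_tiles (origin : Int × Int) (footprint : Int × Int) : List (Int × Int) :=
  let r0 := origin.1
  let c0 := origin.2
  let h := footprint.1
  let w := footprint.2
  (PySem.List.pyRange 0 h 1).foldl (fun acc dr =>
    (PySem.List.pyRange 0 w 1).foldl (fun acc2 dc => acc2 ++ [(r0 + dr, c0 + dc)]) acc) []

-- ===== PORT B =====
-- divide and conquer: empty footprint yields nothing; a single row at h == 1; otherwise
-- split at top = h // 2 and emit the top half then the bottom half
-- (termination lemma for the port: both halves are strictly shorter)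
lemma pv_half_lt (h : Int) (hh : 2 ≤ h) :
    (PySem.Int.floordiv h 2).toNat < h.toNat ∧ (h - PySem.Int.floordiv h 2).toNat < h.toNat := by
  rw [PySem.Int.floordiv_eq_ediv_of_pos (by omega)]
  omega

def footprint_tiles_alt : Int × Int → Int × Int → List (Int × Int)
  | (r0, c0), (h, w) =>
    if h ≤ 0 ∨ w ≤ 0 then []
    else if h = 1 then
      (PySem.List.pyRange 0 w 1).map (fun dc => (r0, c0 + dc))
    else
      let top := PySem.Int.floordiv h 2
      footprint_tiles_alt (r0, c0) (top, w) ++ footprint_tiles_alt (r0 + top, c0) (h - top, w)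
termination_by _ fp => fp.1.toNat
decreasing_by
  · exact (pv_half_lt _ (by omega)).1
  · exact (pv_half_lt _ (by omega)).2

-- ===== PRECONDITION & SPEC =====
def Spec_footprint_tiles (origin : Int × Int) (footprint : Int × Int) (out : List (Int × Int)) : Prop := out = footprint_tiles_alt origin footprint
instance (origin : Int × Int) (footprint : Int × Int) (out : List (Int × Int)) : Decidable (Spec_footprint_tiles origin footprint out) := by unfold Spec_footprint_tiles; infer_instance

-- ===== CLAIM =====
def Claim_equal_footprint_tiles : Prop := ∀ (origin : Int × Int) (footprint : Int × Int), Dom_footprint_tiles origin footprint → Spec_footprint_tiles origin footprint (footprint_tiles origin footprint)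

-- ===== LEMMAS AND PROOFS =====

-- A's nested loop as one flatMap: appending one tile at a time builds the row-major concatenation.
lemma foldA (r0 c0 : Int) (ws : List Int) (l : List Int) (acc : List (Int × Int)) :
    l.foldl (fun acc dr => ws.foldl (fun acc2 dc => acc2 ++ [(r0 + dr, c0 + dc)]) acc) acc
      = acc ++ l.flatMap (fun dr => ws.map (fun dc => (r0 + dr, c0 + dc))) := by
  induction l generalizing acc with
  | nil => simp
  | cons x xs ih =>
      rw [List.foldl_cons, ih, PySem.List.foldl_append_singleton_eq_map,
        List.flatMap_cons, List.append_assoc]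

-- shifting the row range: rows s..h-1 with base r0 are rows 0..h-s-1 with base r0+s.
lemma shiftRows (r0 c0 w s h : Int) :
    (PySem.List.pyRange s h 1).flatMap (fun dr =>
        (PySem.List.pyRange 0 w 1).map (fun dc => (r0 + dr, c0 + dc)))
      = (PySem.List.pyRange 0 (h - s) 1).flatMap (fun dr =>
          (PySem.List.pyRange 0 w 1).map (fun dc => (r0 + s + dr, c0 + dc))) := by
  rw [PySem.List.pyRange_one s h, PySem.List.pyRange_one 0 (h - s)]
  have : (h - s - 0).toNat = (h - s).toNat := by omega
  rw [this, List.flatMap_map, List.flatMap_map]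
  apply List.flatMap_congr
  intro k _
  apply List.map_congr_left
  intro dc _
  have : r0 + (s + (k : Int)) = r0 + s + (0 + k) := by ring
  rw [this]

-- B's divide-and-conquer computes the row-major flatMap.
lemma altB : ∀ (n : Nat) (r0 c0 h w : Int), h.toNat ≤ n →
    footprint_tiles_alt (r0, c0) (h, w)
      = (PySem.List.pyRange 0 h 1).flatMap (fun dr =>
          (PySem.List.pyRange 0 w 1).map (fun dc => (r0 + dr, c0 + dc))) := by
  intro n
  induction n with
  | zero =>
      intro r0 c0 h w hn
      have hh : h ≤ 0 := by omega
      rw [footprint_tiles_alt.eq_def, PySem.List.pyRange_one_eq_nil hh]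
      dsimp only
      rw [if_pos (Or.inl hh), List.flatMap_nil]
  | succ n ih =>
      intro r0 c0 h w hn
      rw [footprint_tiles_alt.eq_def]
      dsimp only
      by_cases hg : h ≤ 0 ∨ w ≤ 0
      · rw [if_pos hg]
        rcases hg with hh | hw
        · rw [PySem.List.pyRange_one_eq_nil hh, List.flatMap_nil]
        · rw [PySem.List.pyRange_one_eq_nil hw]
          exact (List.flatMap_eq_nil_iff.mpr (fun a _ => List.map_nil)).symm
      · rw [if_neg hg]
        push_neg at hg
        by_cases h1 : h = 1
        · subst h1
          rw [if_pos rfl]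
          rw [show (PySem.List.pyRange 0 1 1) = [(0 : Int)] from PySem.List.pyRange_one_singleton 0]
          simp
        · rw [if_neg h1]
          have h2 : 2 ≤ h := by omega
          have htop := PySem.Int.floordiv_eq_ediv_of_pos (a := h) (b := 2) (by omega)
          set top := PySem.Int.floordiv h 2 with hts
          have hb : 1 ≤ top ∧ top < h := by rw [htop]; omega
          rw [ih r0 c0 top w (by omega), ih (r0 + top) c0 (h - top) w (by omega),
            ← shiftRows r0 c0 w top h,
            PySem.List.pyRange_one_append 0 top h (by omega) (by omega),
            List.flatMap_append]

theorem footprint_tiles_spec : Claim_equal_footprint_tiles := by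
  intro origin footprint _
  unfold Spec_footprint_tiles footprint_tiles
  obtain ⟨r0, c0⟩ := origin
  obtain ⟨h, w⟩ := footprint
  simp only
  rw [foldA, altB h.toNat r0 c0 h w le_rfl]
  simp
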